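-- pv_equiv track=rewrite | github.com/Jihyeok11/Algorithm | Python/코테/2022 KAKAO BLIND RECRUITMENT/4.py | solution
-- ===== SOURCE A (Python) =====
-- from collections import deque
--
-- def solution(n, info):
--     answer = []
--     ba = deque([[n, []]])
--     cnt = 0
--     while cnt < 11:
--         for _ in range(len(ba)):
--             arrow, li = ba.popleft()
--             if cnt == 10:
--                 ba.append([0, li + [arrow]])
--             else:
--                 ba.append([arrow, li + [0]])
--                 res = arrow - info[cnt] - 1
--                 if res >= 0:
--                     ba.append([res, li + [info[cnt] + 1]])
--         cnt += 1
--     Max = 0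
--     tp = 0
--     for i in ba:
--         score = 0
--         apeach = 0
--         for s in range(11):
--             if i[1][s] > info[s]:
--                 score += (10 - s)
--             elif i[1][s] <= info[s] and info[s] > 0:
--                 apeach += (10 - s)
--         gap = score - apeach
--         if Max < gap:
--             answer = i[1]
--             Max = gap
--         elif gap > 0 and Max == gap:
--             for j in range(10, -1, -1):
--                 if answer[j] > i[1][j]:
--                     break
--                 elif answer[j] < i[1][j]:
--                     answer = i[1]
--     if Max:
--         return answer
--     else:
--         return [-1]
-- ===== SOURCE B (Python) =====
-- def solution(n, info):
--     # Recursive backtracking generator instead of a level-by-level BFS deque.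
--     def shots(i, arrows):
--         if i == 10:
--             return [[arrows]]
--         need = info[i] + 1
--         out = [[0] + rest for rest in shots(i + 1, arrows)]
--         if arrows >= need:
--             out += [[need] + rest for rest in shots(i + 1, arrows - need)]
--         return out
--     best, best_gap = [], 0
--     for lion in shots(0, n):
--         score = sum(10 - s for s in range(11) if lion[s] > info[s])
--         apeach = sum(10 - s for s in range(11) if lion[s] <= info[s] and info[s] > 0)
--         gap = score - apeach
--         if gap > best_gap:
--             best, best_gap = lion, gap
--         elif gap == best_gap and gap > 0:
--             for j in range(10, -1, -1):
--                 if best[j] > lion[j]: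
--                     break
--                 elif best[j] < lion[j]:
--                     best = lion
--     return best if best_gap > 0 else [-1]
-- ===== Notes on version B (the rewrite author's own statement) =====
-- stated objective: simpler
-- what changed: Replaces A's level-by-level BFS over an explicit deque (rotating the queue once per ring) by a direct recursive backtracking generator producing the same candidate arrays in the same order, and computes the score/apeach totals with sum comprehensions instead of an accumulator loop.
import Mathlib
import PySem

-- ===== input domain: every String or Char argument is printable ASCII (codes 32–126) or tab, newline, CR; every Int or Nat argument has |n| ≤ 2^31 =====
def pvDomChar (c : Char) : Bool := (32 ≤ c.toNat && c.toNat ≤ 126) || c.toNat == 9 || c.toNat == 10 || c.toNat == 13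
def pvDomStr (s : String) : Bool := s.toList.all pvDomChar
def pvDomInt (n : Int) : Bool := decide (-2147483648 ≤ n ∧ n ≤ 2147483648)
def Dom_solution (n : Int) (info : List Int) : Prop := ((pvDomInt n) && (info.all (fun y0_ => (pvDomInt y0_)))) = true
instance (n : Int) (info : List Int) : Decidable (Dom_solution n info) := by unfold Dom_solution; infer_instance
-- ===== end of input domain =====

-- B replaces A's level-by-level BFS over an explicit deque by a direct recursive
-- backtracking generator of the same candidate lists (same order), and computes the
-- score/apeach totals with sum-comprehensions; objective: simpler.

-- ===== PORT A =====
-- shared index helper `xs[k]` (0 ≤ k here); the `.getD 0` arm is unreachable under Pre_solution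
def pyAt (xs : List Int) (k : Int) : Int := (PySem.List.pyGet? xs k).getD 0

-- body of one `popleft`/`append` iteration: the children appended for the popped state
def aStep (info : List Int) (cnt : Nat) (x : Int × List Int) : List (Int × List Int) :=
  if cnt == 10 then [(0, x.2 ++ [x.1])]
  else
    let res := x.1 - pyAt info (cnt : Int) - 1
    (x.1, x.2 ++ [0]) :: (if 0 ≤ res then [(res, x.2 ++ [pyAt info (cnt : Int) + 1])] else [])

-- `for _ in range(len(ba)):` — one level of the deque rotation
def aLevel (info : List Int) (cnt : Nat) (ba : List (Int × List Int)) : List (Int × List Int) :=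
  (List.range ba.length).foldl
    (fun q _ => match q with | [] => [] | x :: rest => rest ++ aStep info cnt x) ba

-- the `for s in range(11)` score/apeach accumulation
def aScore (info li : List Int) : Int × Int :=
  (List.range 11).foldl
    (fun (p : Int × Int) (s : Nat) =>
      if pyAt info (s : Int) < pyAt li (s : Int) then (p.1 + (10 - (s : Int)), p.2)
      else if pyAt li (s : Int) ≤ pyAt info (s : Int) ∧ 0 < pyAt info (s : Int) then
        (p.1, p.2 + (10 - (s : Int)))
      else p) (0, 0)

-- the `for j in range(10, -1, -1)` tie-break loop (textually identical in A and in Source B; shared)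
def pickTie (answer li : List Int) : List Int :=
  ((PySem.List.pyRange 10 (-1) (-1)).foldl
    (fun (st : List Int × Bool) j =>
      if st.2 then st
      else if pyAt li j < pyAt st.1 j then (st.1, true)
      else if pyAt st.1 j < pyAt li j then (li, st.2)
      else st) (answer, false)).1

-- one iteration of `for i in ba:` with state (answer, Max, tp)
def aEval (info : List Int) (st : List Int × Int × Int) (x : Int × List Int) : List Int × Int × Int :=
  let sc := aScore info x.2
  let gap := sc.1 - sc.2
  if st.2.1 < gap then (x.2, gap, st.2.2)
  else if 0 < gap ∧ st.2.1 = gap then (pickTie st.1 x.2, st.2.1, st.2.2)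
  else st

def solution (n : Int) (info : List Int) : List Int :=
  let ba := (List.range 11).foldl (fun q cnt => aLevel info cnt q) [(n, [])]
  let r := ba.foldl (aEval info) ([], 0, 0)
  if r.2.1 ≠ 0 then r.1 else [-1]

-- ===== PORT B =====
-- `if i == 10` in Source B, written `10 ≤ i` for termination (equal on all reachable calls, i ≤ 10)
def shots (info : List Int) (i : Nat) (arrows : Int) : List (List Int) :=
  if 10 ≤ i then [[arrows]]
  else
    let need := pyAt info (i : Int) + 1
    (shots info (i + 1) arrows).map (fun rest => 0 :: rest) ++
      (if need ≤ arrows then (shots info (i + 1) (arrows - need)).map (fun rest => need :: rest)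
       else [])
termination_by 10 - i

-- `score - apeach` via the two sum-comprehensions of Source B
def bGap (info li : List Int) : Int :=
  (((List.range 11).filter (fun (s : Nat) => decide (pyAt info (s : Int) < pyAt li (s : Int)))).map
      (fun (s : Nat) => (10 : Int) - (s : Int))).sum -
  (((List.range 11).filter (fun (s : Nat) =>
        decide (pyAt li (s : Int) ≤ pyAt info (s : Int)) && decide (0 < pyAt info (s : Int)))).map
      (fun (s : Nat) => (10 : Int) - (s : Int))).sum

-- one iteration of `for lion in shots(0, n):` with state (best, best_gap)
def bEval (info : List Int) (st : List Int × Int) (li : List Int) : List Int × Int :=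
  let gap := bGap info li
  if st.2 < gap then (li, gap)
  else if gap = st.2 ∧ 0 < gap then (pickTie st.1 li, st.2)
  else st

def solution_alt (n : Int) (info : List Int) : List Int :=
  let r := (shots info 0 n).foldl (bEval info) ([], 0)
  if 0 < r.2 then r.1 else [-1]

-- ===== PRECONDITION & SPEC =====
-- A indexes info[0..10], so it raises IndexError iff len(info) < 11; exactly that is excluded.
def Pre_solution (_n : Int) (info : List Int) : Prop := 11 ≤ info.length
instance (n : Int) (info : List Int) : Decidable (Pre_solution n info) := by
  unfold Pre_solution; infer_instance

def pvWitness_solution : Int × List Int := (5, [1, 0, 2, 0, 0, 0, 0, 0, 0, 0, 0])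

def Spec_solution (n : Int) (info : List Int) (out : List Int) : Prop := out = solution_alt n info
instance (n : Int) (info : List Int) (out : List Int) : Decidable (Spec_solution n info out) := by
  unfold Spec_solution; infer_instance

-- ===== CLAIM (what is proved, stated in full; the proofs are below) =====
def Claim_equal_solution : Prop := ∀ (n : Int) (info : List Int), Dom_solution n info →
  Pre_solution n info → Spec_solution n info (solution n info)

-- ===== LEMMAS AND PROOFS =====

-- the deque rotation of one level equals flatMap of the children
theorem rotate_eq' {α : Type} (g : List α → Nat → List α) (f : α → List α)
    (hg : ∀ (x : α) (rest : List α) (i : Nat), g (x :: rest) i = rest ++ f x) :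
    ∀ (ba : List α) (idx : List Nat) (extra : List α), idx.length = ba.length →
      idx.foldl g (ba ++ extra) = extra ++ ba.flatMap f := by
  intro ba
  induction ba with
  | nil =>
    intro idx extra hl
    rw [List.length_nil, List.length_eq_zero_iff] at hl
    simp [hl]
  | cons x t ih =>
    intro idx extra hl
    match idx with
    | i :: idx' =>
      rw [List.foldl_cons, List.cons_append, hg, List.append_assoc,
        ih idx' (extra ++ f x) (by simpa using hl)]
      simp

theorem aLevel_eq (info : List Int) (cnt : Nat) (ba : List (Int × List Int)) :
    aLevel info cnt ba = ba.flatMap (aStep info cnt) := by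
  have := rotate_eq'
    (fun q _ => match q with | [] => [] | x :: rest => rest ++ aStep info cnt x)
    (aStep info cnt) (fun x rest i => rfl) ba (List.range ba.length) []
    (by simp)
  simpa [aLevel] using this

-- splitting an iterated flatMap at the starting list
theorem levels_flatMap (info : List Int) :
    ∀ (l : List Nat) (q : List (Int × List Int)),
      l.foldl (fun q c => q.flatMap (aStep info c)) q =
        q.flatMap (fun x => l.foldl (fun q c => q.flatMap (aStep info c)) [x]) := by
  intro l
  induction l with
  | nil => intro q; simp
  | cons c l ih =>
    intro q
    rw [List.foldl_cons, ih (q.flatMap (aStep info c)), List.flatMap_assoc]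
    refine (List.flatMap_congr ?_).symm
    intro x hx
    rw [List.foldl_cons, ih (List.flatMap (aStep info c) [x])]
    simp

-- the BFS from a single state over levels cnt..10 is exactly shots
theorem levels_eq_shots (info : List Int) :
    ∀ (k cnt : Nat) (arrow : Int) (li : List Int), cnt + k = 10 →
      (List.range' cnt (k + 1)).foldl (fun q c => q.flatMap (aStep info c)) [(arrow, li)] =
        (shots info cnt arrow).map (fun t => ((0 : Int), li ++ t)) := by
  intro k
  induction k with
  | zero =>
    intro cnt arrow li h
    have hc : cnt = 10 := by omega
    subst hc
    rw [shots]
    simp [aStep]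
  | succ k ih =>
    intro cnt arrow li h
    have hc : cnt < 10 := by omega
    have hne : (cnt == 10) = false := by simp; omega
    rw [List.range'_succ, List.foldl_cons,
      show List.flatMap (aStep info cnt) [(arrow, li)] = aStep info cnt (arrow, li) by simp,
      levels_flatMap]
    have hres : arrow - pyAt info (cnt : Int) - 1 = arrow - (pyAt info (cnt : Int) + 1) := by ring
    rw [shots]
    simp only [aStep, hne, Bool.false_eq_true, if_false, Nat.not_le.mpr hc]
    by_cases h0 : 0 ≤ arrow - pyAt info (cnt : Int) - 1
    · rw [if_pos h0, if_pos (by omega : pyAt info (cnt : Int) + 1 ≤ arrow)]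
      simp only [List.flatMap_cons, List.flatMap_nil, List.append_nil,
        ih (cnt+1) arrow (li ++ [0]) (by omega), ih (cnt+1) _ (li ++ [pyAt info (cnt : Int) + 1]) (by omega),
        List.map_append, List.map_map, hres]
      simp [Function.comp_def]
    · rw [if_neg h0, if_neg (by omega : ¬ pyAt info (cnt : Int) + 1 ≤ arrow)]
      simp only [List.flatMap_cons, List.flatMap_nil, List.append_nil,
        ih (cnt+1) arrow (li ++ [0]) (by omega), List.map_map]
      simp [Function.comp_def]

theorem ba_eq_shots (info : List Int) (n : Int) :
    (List.range 11).foldl (fun q cnt => aLevel info cnt q) [(n, [])] =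
      (shots info 0 n).map (fun t => ((0 : Int), t)) := by
  have h1 : ∀ (q : List (Int × List Int)),
      (List.range 11).foldl (fun q cnt => aLevel info cnt q) q =
        (List.range 11).foldl (fun q c => q.flatMap (aStep info c)) q := by
    simp only [aLevel_eq, implies_true]
  rw [h1, List.range_eq_range']
  have := levels_eq_shots info 10 0 n [] (by omega)
  simpa using this

-- A's accumulated (score, apeach) pair equals B's two comprehension sums
theorem score_fold (info li : List Int) :
    ∀ (js : List Nat) (p : Int × Int),
      js.foldl (fun (p : Int × Int) (s : Nat) =>
          if pyAt info (s : Int) < pyAt li (s : Int) then (p.1 + (10 - (s : Int)), p.2)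
          else if pyAt li (s : Int) ≤ pyAt info (s : Int) ∧ 0 < pyAt info (s : Int) then
            (p.1, p.2 + (10 - (s : Int)))
          else p) p =
      (p.1 + ((js.filter (fun (s : Nat) => decide (pyAt info (s : Int) < pyAt li (s : Int)))).map
          (fun (s : Nat) => (10 : Int) - (s : Int))).sum,
       p.2 + ((js.filter (fun (s : Nat) => decide (pyAt li (s : Int) ≤ pyAt info (s : Int)) &&
            decide (0 < pyAt info (s : Int)))).map (fun (s : Nat) => (10 : Int) - (s : Int))).sum) := by
  intro js
  induction js with
  | nil => intro p; simp
  | cons j js ih =>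
    intro p
    rw [List.foldl_cons]
    by_cases h1 : pyAt info (j : Int) < pyAt li (j : Int)
    · have h2 : ¬ (pyAt li (j : Int) ≤ pyAt info (j : Int) ∧ 0 < pyAt info (j : Int)) := by
        rintro ⟨hle, _⟩; omega
      have c1 : decide (pyAt info (j : Int) < pyAt li (j : Int)) = true := by simpa using h1
      have c2 : (decide (pyAt li (j : Int) ≤ pyAt info (j : Int)) &&
          decide (0 < pyAt info (j : Int))) = false := by
        rw [← Bool.decide_and, decide_eq_false_iff_not]; exact h2
      rw [if_pos h1, ih]
      simp only [List.filter_cons, c1, c2, if_true, Bool.false_eq_true, if_false,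
        List.map_cons, List.sum_cons]
      refine congrArg₂ Prod.mk ?_ ?_ <;> ring
    · have hle : pyAt li (j : Int) ≤ pyAt info (j : Int) := by omega
      have c1 : decide (pyAt info (j : Int) < pyAt li (j : Int)) = false := by simpa using h1
      rw [if_neg h1]
      by_cases h2 : 0 < pyAt info (j : Int)
      · have c2 : (decide (pyAt li (j : Int) ≤ pyAt info (j : Int)) &&
            decide (0 < pyAt info (j : Int))) = true := by
          rw [← Bool.decide_and, decide_eq_true_eq]; exact ⟨hle, h2⟩
        rw [if_pos ⟨hle, h2⟩, ih]
        simp only [List.filter_cons, c1, c2, if_true, Bool.false_eq_true, if_false,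
          List.map_cons, List.sum_cons]
        refine congrArg₂ Prod.mk ?_ ?_ <;> ring
      · have hcond : ¬ (pyAt li (j : Int) ≤ pyAt info (j : Int) ∧ 0 < pyAt info (j : Int)) := by
          rintro ⟨_, hp⟩; omega
        have c2 : (decide (pyAt li (j : Int) ≤ pyAt info (j : Int)) &&
            decide (0 < pyAt info (j : Int))) = false := by
          rw [← Bool.decide_and, decide_eq_false_iff_not]; exact hcond
        rw [if_neg hcond, ih]
        simp only [List.filter_cons, c1, c2, Bool.false_eq_true, if_false]

theorem aScore_eq (info li : List Int) :
    (aScore info li).1 - (aScore info li).2 = bGap info li := by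
  unfold aScore bGap
  rw [score_fold info li (List.range 11) (0, 0)]
  simp

-- the selection folds agree (with Max = best_gap kept nonnegative)
theorem eval_invariant (info : List Int) :
    ∀ (lions : List (List Int)) (ans : List Int) (g tp : Int), 0 ≤ g →
      (lions.foldl (fun st t => aEval info st ((0 : Int), t)) (ans, g, tp)).1 =
          (lions.foldl (bEval info) (ans, g)).1 ∧
        (lions.foldl (fun st t => aEval info st ((0 : Int), t)) (ans, g, tp)).2.1 =
          (lions.foldl (bEval info) (ans, g)).2 ∧
        0 ≤ (lions.foldl (bEval info) (ans, g)).2 := by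
  intro lions
  induction lions with
  | nil => intro ans g tp hg; exact ⟨rfl, rfl, hg⟩
  | cons t lions ih =>
    intro ans g tp hg
    rw [List.foldl_cons, List.foldl_cons]
    have hgap := aScore_eq info t
    by_cases hlt : g < bGap info t
    · have ha : aEval info (ans, g, tp) ((0 : Int), t) = (t, bGap info t, tp) := by
        simp only [aEval]; rw [hgap, if_pos hlt]
      have hb : bEval info (ans, g) t = (t, bGap info t) := by
        simp only [bEval]; rw [if_pos hlt]
      rw [ha, hb]; exact ih t (bGap info t) tp (by omega)
    · by_cases heq : bGap info t = g ∧ 0 < bGap info t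
      · have ha : aEval info (ans, g, tp) ((0 : Int), t) = (pickTie ans t, g, tp) := by
          simp only [aEval]; rw [hgap, if_neg hlt, if_pos ⟨heq.2, heq.1.symm⟩]
        have hb : bEval info (ans, g) t = (pickTie ans t, g) := by
          simp only [bEval]; rw [if_neg hlt, if_pos heq]
        rw [ha, hb]; exact ih (pickTie ans t) g tp hg
      · have ha : aEval info (ans, g, tp) ((0 : Int), t) = (ans, g, tp) := by
          simp only [aEval]
          rw [hgap, if_neg hlt, if_neg (by rintro ⟨h1, h2⟩; exact heq ⟨h2.symm, h1⟩)]
        have hb : bEval info (ans, g) t = (ans, g) := by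
          simp only [bEval]; rw [if_neg hlt, if_neg heq]
        rw [ha, hb]; exact ih ans g tp hg

-- ===== VERDICT (by name: the statement is the Claim_ definition above) =====
theorem solution_spec : Claim_equal_solution := by
  intro n info _ _
  unfold Spec_solution solution solution_alt
  simp only [ba_eq_shots, List.foldl_map]
  obtain ⟨h1, h2, h3⟩ := eval_invariant info (shots info 0 n) [] 0 0 le_rfl
  simp only [h1, h2]
  have : ((shots info 0 n).foldl (bEval info) ([], 0)).2 ≠ 0 ↔
      0 < ((shots info 0 n).foldl (bEval info) ([], 0)).2 := by omega
  split_ifs with ha hb hb <;> simp_all
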